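-- pv_equiv track=rewrite | github.com/qu-jiagang/DeskVane | deskvane/tray.py | _node_host_token
-- ===== SOURCE A (Python) =====
-- def _node_host_token(node: str) -> str:
--     if "@" not in node:
--         return ""
--     host = node.rsplit("@", 1)[-1].strip()
--     if not host:
--         return ""
--     for sep in ("/", ":", "."):
--         if sep in host:
--             host = host.split(sep, 1)[0]
--     return host.strip()
-- ===== SOURCE B (Python) =====
-- def _node_host_token(node: str) -> str:
--     if "@" not in node:
--         return ""
--     host = node.rsplit("@", 1)[-1].strip()
--     if not host:
--         return ""
--     cuts = [i for i in (host.find(c) for c in "/:.") if i != -1]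
--     if cuts:
--         host = host[:min(cuts)]
--     return host.strip()
-- ===== Notes on version B (the rewrite author's own statement) =====
-- stated objective: idiomatic
-- what changed: Replaces the loop of three sequential conditional split-and-keep-prefix passes by computing the minimum index of any separator found and doing a single slice there.
import Mathlib
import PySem

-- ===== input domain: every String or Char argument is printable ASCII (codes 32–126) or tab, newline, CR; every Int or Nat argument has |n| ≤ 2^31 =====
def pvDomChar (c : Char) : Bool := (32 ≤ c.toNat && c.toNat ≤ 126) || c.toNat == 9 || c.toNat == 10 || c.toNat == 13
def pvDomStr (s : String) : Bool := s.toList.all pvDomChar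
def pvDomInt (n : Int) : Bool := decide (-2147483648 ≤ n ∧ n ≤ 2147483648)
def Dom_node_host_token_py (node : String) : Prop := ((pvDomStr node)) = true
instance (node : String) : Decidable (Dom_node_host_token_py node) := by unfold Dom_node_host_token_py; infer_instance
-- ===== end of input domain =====

-- B replaces A's three sequential conditional prefix-splits by one cut at the minimum separator index (idiomatic; same cost).


-- ===== PORT A =====
-- node.rsplit("@", 1)[-1]: under the '@ in node' guard this is exactly the part after the LAST '@'
-- (ported as drop past the rfind index; exact here since '@' is present).
def node_host_token_py (node : String) : String :=
  if PySem.Chars.isIn ['@'] node.toList = false then "" else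
  let host0 := PySem.Chars.strip
      (node.toList.drop ((PySem.Chars.rfind node.toList ['@']).toNat + 1))
  if host0 = [] then "" else
  -- for sep in ("/", ":", "."): if sep in host: host = host.split(sep, 1)[0]
  let h1 := if PySem.Chars.isIn ['/'] host0 then (PySem.Chars.splitOnMax host0 ['/'] 1).headD [] else host0
  let h2 := if PySem.Chars.isIn [':'] h1 then (PySem.Chars.splitOnMax h1 [':'] 1).headD [] else h1
  let h3 := if PySem.Chars.isIn ['.'] h2 then (PySem.Chars.splitOnMax h2 ['.'] 1).headD [] else h2
  String.ofList (PySem.Chars.strip h3)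

-- ===== PORT B =====
def node_host_token_py_alt (node : String) : String :=
  if PySem.Chars.isIn ['@'] node.toList = false then "" else
  let host := PySem.Chars.strip
      (node.toList.drop ((PySem.Chars.rfind node.toList ['@']).toNat + 1))
  if host = [] then "" else
  -- cuts = [i for i in (host.find(c) for c in "/:.") if i != -1]; if cuts: host = host[:min(cuts)]
  let cuts := ((['/', ':', '.'].map (fun c => PySem.Chars.find host [c])).filter (fun i => i != -1))
  let host' := match cuts.min? with
    | some m => PySem.Chars.slice host none (some m)
    | none => host
  String.ofList (PySem.Chars.strip host')

-- ===== PRECONDITION & SPEC =====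
def Spec_node_host_token_py (node : String) (out : String) : Prop := out = node_host_token_py_alt node
instance (node : String) (out : String) : Decidable (Spec_node_host_token_py node out) := by unfold Spec_node_host_token_py; infer_instance

-- ===== CLAIM (what is proved, stated in full; the proofs are below) =====
def Claim_equal_node_host_token_py : Prop := ∀ (node : String), Dom_node_host_token_py node → Spec_node_host_token_py node (node_host_token_py node)

-- ===== LEMMAS AND PROOFS =====

theorem go_zero (c : Char) (fuel : Nat) (l cur : List Char) (acc : List (List Char)) :
    PySem.Chars.splitOnMax.go [c] fuel 0 l cur acc = ((cur.reverse ++ l) :: acc).reverse := by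
  cases fuel with
  | zero => simp [PySem.Chars.splitOnMax.go]
  | succ f => cases l <;> simp [PySem.Chars.splitOnMax.go]

theorem go_one (c : Char) (fuel : Nat) (l cur : List Char) (hf : l.length ≤ fuel) (hc : c ∈ l) :
    PySem.Chars.splitOnMax.go [c] fuel 1 l cur [] =
      [cur.reverse ++ l.takeWhile (· != c), (l.dropWhile (· != c)).tail] := by
  induction l generalizing fuel cur with
  | nil => simp at hc
  | cons x t ih =>
    cases fuel with
    | zero => simp at hf
    | succ f =>
      by_cases hx : x = c
      · subst hx
        simp [PySem.Chars.splitOnMax.go, List.isPrefixOf, go_zero]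
      · have hct : c ∈ t := by
          rcases List.mem_cons.mp hc with h | h
          · exact absurd h.symm hx
          · exact h
        simp only [PySem.Chars.splitOnMax.go]
        rw [if_neg (by simp), if_neg (by simp [List.isPrefixOf, Ne.symm hx])]
        rw [ih f (x :: cur) (by simpa using hf) hct]
        simp [hx]

theorem isIn_single (c : Char) (cs : List Char) : PySem.Chars.isIn [c] cs = true ↔ c ∈ cs := by
  rw [PySem.Chars.isIn_iff_infix]
  constructor
  · intro h; exact h.mem (by simp)
  · intro h
    obtain ⟨p, q, rfl⟩ := List.mem_iff_append.mp h
    exact ⟨p, q, by simp⟩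

theorem stepA (c : Char) (cs : List Char) :
    (if PySem.Chars.isIn [c] cs then (PySem.Chars.splitOnMax cs [c] 1).headD [] else cs)
      = cs.takeWhile (· != c) := by
  by_cases hc : c ∈ cs
  · rw [if_pos ((isIn_single c cs).mpr hc)]
    unfold PySem.Chars.splitOnMax
    rw [if_neg (by norm_num)]
    simp [go_one c (cs.length + 1) cs [] (by omega) hc]
  · rw [if_neg (by simp [isIn_single, hc])]
    rw [List.takeWhile_eq_self_iff.mpr]
    intro x hx
    simp only [bne_iff_ne, ne_eq]
    exact fun h => hc (h ▸ hx)

theorem findgo_char (c : Char) (cs : List Char) (k : Nat) :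
    PySem.Chars.find.go [c] cs k =
      if c ∈ cs then ((k + cs.findIdx (· == c) : Nat) : Int) else -1 := by
  induction cs generalizing k with
  | nil => simp [PySem.Chars.find.go]
  | cons x t ih =>
    by_cases hx : x = c
    · subst hx
      simp [PySem.Chars.find.go, List.isPrefixOf, List.findIdx_cons]
    · simp only [PySem.Chars.find.go]
      rw [if_neg (by simp [List.isPrefixOf, Ne.symm hx])]
      rw [ih (k + 1)]
      have hxc : (x == c) = false := by simp [hx]
      simp only [List.mem_cons, List.findIdx_cons, hxc, cond_false]
      by_cases hct : c ∈ t
      · rw [if_pos (Or.inr hct), if_pos hct]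
        push_cast; ring
      · rw [if_neg (fun hor => Or.elim hor (fun h1 => hx h1.symm) hct), if_neg hct]

theorem find_char (c : Char) (cs : List Char) :
    PySem.Chars.find cs [c] = if c ∈ cs then ((cs.findIdx (· == c) : Nat) : Int) else -1 := by
  have : PySem.Chars.find cs [c] = PySem.Chars.find.go [c] cs 0 := rfl
  rw [this, findgo_char]; simp

theorem findIdx_or (p q : Char → Bool) (l : List Char) :
    l.findIdx (fun x => p x || q x) = min (l.findIdx p) (l.findIdx q) := by
  induction l with
  | nil => simp
  | cons x t ih =>
    by_cases hp : p x = true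
    · simp only [List.findIdx_cons, hp, Bool.true_or, cond_true]
      omega
    · by_cases hq : q x = true
      · simp only [List.findIdx_cons, hp, hq, Bool.false_or, cond_true, cond_false]
        omega
      · simp only [List.findIdx_cons, hp, hq, Bool.false_or, cond_false, ih]
        omega


def pOr : Char → Bool := fun x => x == '/' || x == ':' || x == '.'

theorem idxlen (c : Char) (cs : List Char) (h : c ∉ cs) : cs.findIdx (· == c) = cs.length := by
  apply List.findIdx_eq_length.mpr
  intro x hx
  simp only [beq_eq_false_iff_ne, ne_eq]
  exact fun he => h (he ▸ hx)

theorem chainA (cs : List Char) :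
    ((cs.takeWhile (· != '/')).takeWhile (· != ':')).takeWhile (· != '.')
      = cs.take (cs.findIdx pOr) := by
  rw [List.takeWhile_takeWhile, List.takeWhile_takeWhile, List.takeWhile_eq_take_findIdx_not]
  congr 2
  funext a
  by_cases h1 : a = '/' <;> by_cases h2 : a = ':' <;> by_cases h3 : a = '.' <;>
    simp [pOr, h1, h2, h3]

theorem sliceTake (cs : List Char) (m : Int) (h : 0 ≤ m) :
    PySem.Chars.slice cs none (some m) = cs.take m.toNat := by
  rw [PySem.Chars.slice_eq_listSlice]
  exact PySem.List.slice_to cs h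

theorem coreB (cs : List Char) :
    (match ((['/', ':', '.'].map (fun c => PySem.Chars.find cs [c])).filter (fun i => i != -1)).min? with
      | some m => PySem.Chars.slice cs none (some m)
      | none => cs)
      = cs.take (cs.findIdx pOr) := by
  have hfi : cs.findIdx pOr = min (cs.findIdx (· == '/')) (min (cs.findIdx (· == ':')) (cs.findIdx (· == '.'))) := by
    have h1 := findIdx_or (fun x => x == '/') (fun x => x == ':' || x == '.') cs
    have h2 := findIdx_or (fun x => x == ':') (fun x => x == '.') cs
    unfold pOr
    rw [show (fun x : Char => x == '/' || x == ':' || x == '.') =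
        (fun x : Char => x == '/' || (x == ':' || x == '.')) from by funext x; rw [Bool.or_assoc]]
    rw [h1, h2]
  set n1 := cs.findIdx (· == '/') with hn1
  set n2 := cs.findIdx (· == ':') with hn2
  set n3 := cs.findIdx (· == '.') with hn3
  have hb1 : n1 ≤ cs.length := List.findIdx_le_length
  have hb2 : n2 ≤ cs.length := List.findIdx_le_length
  have hb3 : n3 ≤ cs.length := List.findIdx_le_length
  simp only [List.map, List.filter, find_char, hn1.symm, hn2.symm, hn3.symm]
  rw [hfi]
  by_cases m1 : '/' ∈ cs <;> by_cases m2 : ':' ∈ cs <;> by_cases m3 : '.' ∈ cs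
  all_goals simp only [m1, m2, m3, if_true, if_false]
  all_goals simp only [show ∀ n : Nat, ((n : Int) != -1) = true from fun n => by simp,
    show ((-1 : Int) != -1) = false from by decide]
  · rw [show (([(n1 : Int), (n2 : Int), (n3 : Int)]).min? = some (min (n1:Int) (min (n2:Int) (n3:Int)))) from by simp [List.min?]]
    show PySem.Chars.slice cs none (some _) = _
    rw [sliceTake]
    · congr 1; omega
    · omega
  · have e3 : n3 = cs.length := hn3 ▸ idxlen '.' cs m3
    rw [show (([(n1 : Int), (n2 : Int)]).min? = some (min (n1:Int) (n2:Int))) from by simp [List.min?]]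
    show PySem.Chars.slice cs none (some _) = _
    rw [sliceTake]
    · congr 1; omega
    · omega
  · have e2 : n2 = cs.length := hn2 ▸ idxlen ':' cs m2
    rw [show (([(n1 : Int), (n3 : Int)]).min? = some (min (n1:Int) (n3:Int))) from by simp [List.min?]]
    show PySem.Chars.slice cs none (some _) = _
    rw [sliceTake]
    · congr 1; omega
    · omega
  · have e2 : n2 = cs.length := hn2 ▸ idxlen ':' cs m2
    have e3 : n3 = cs.length := hn3 ▸ idxlen '.' cs m3
    rw [show (([(n1 : Int)]).min? = some (n1:Int)) from by simp [List.min?]]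
    show PySem.Chars.slice cs none (some _) = _
    rw [sliceTake]
    · congr 1; omega
    · omega
  · have e1 : n1 = cs.length := hn1 ▸ idxlen '/' cs m1
    rw [show (([(n2 : Int), (n3 : Int)]).min? = some (min (n2:Int) (n3:Int))) from by simp [List.min?]]
    show PySem.Chars.slice cs none (some _) = _
    rw [sliceTake]
    · congr 1; omega
    · omega
  · have e1 : n1 = cs.length := hn1 ▸ idxlen '/' cs m1
    have e3 : n3 = cs.length := hn3 ▸ idxlen '.' cs m3
    rw [show (([(n2 : Int)]).min? = some (n2:Int)) from by simp [List.min?]]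
    show PySem.Chars.slice cs none (some _) = _
    rw [sliceTake]
    · congr 1; omega
    · omega
  · have e1 : n1 = cs.length := hn1 ▸ idxlen '/' cs m1
    have e2 : n2 = cs.length := hn2 ▸ idxlen ':' cs m2
    rw [show (([(n3 : Int)]).min? = some (n3:Int)) from by simp [List.min?]]
    show PySem.Chars.slice cs none (some _) = _
    rw [sliceTake]
    · congr 1; omega
    · omega
  · have e1 : n1 = cs.length := hn1 ▸ idxlen '/' cs m1
    have e2 : n2 = cs.length := hn2 ▸ idxlen ':' cs m2
    have e3 : n3 = cs.length := hn3 ▸ idxlen '.' cs m3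
    simp only [List.min?]
    rw [List.take_of_length_le (by omega)]

theorem main_eq (node : String) : node_host_token_py node = node_host_token_py_alt node := by
  unfold node_host_token_py node_host_token_py_alt
  by_cases hin : PySem.Chars.isIn ['@'] node.toList = false
  · rw [if_pos hin, if_pos hin]
  · rw [if_neg hin, if_neg hin]
    set host := PySem.Chars.strip (node.toList.drop ((PySem.Chars.rfind node.toList ['@']).toNat + 1)) with hh0
    by_cases hh : host = []
    · rw [if_pos hh, if_pos hh]
    · rw [if_neg hh, if_neg hh]
      simp only [stepA]
      rw [coreB, chainA]

-- ===== VERDICT (by name: the statement is the Claim_ definition above) =====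
theorem node_host_token_py_spec : Claim_equal_node_host_token_py := by
  intro node _
  unfold Spec_node_host_token_py
  exact main_eq node
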